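-- pv_equiv track=rewrite | github.com/acgis-opre0007/gis4107-week05 | seqmod.py | mod_sequence
-- ===== SOURCE A (Python) =====
-- def mod_sequence(seq,skip_index=None,truncate_index=None):
--     """
--     Given a string, returns a version that has been truncated and had some character omitted.
--     seq -- initial string
--     skip_index -- the position of the character to be omitted
--     truncate_index -- the position before which to truncate the string; ignored when equal to or greater
--         than initial string length
--     """
--
--     seq_length = len(seq)
--     result = ''
--     if truncate_index == None or truncate_index >= (seq_length):
--         start_value = 0
--     else:
--         start_value = truncate_index
--
--     for x in range(start_value,seq_length):
--         if x == skip_index: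
--             continue
--         else:
--             result += seq[x]
--
--     return result
-- ===== SOURCE B (Python) =====
-- def mod_sequence(seq, skip_index=None, truncate_index=None):
--     n = len(seq)
--     if truncate_index is None or truncate_index >= n:
--         start = 0
--     elif truncate_index < 0:
--         start = n + truncate_index
--     else:
--         start = truncate_index
--     if skip_index is not None and start <= skip_index < n:
--         return seq[start:skip_index] + seq[skip_index + 1:]
--     return seq[start:]
-- ===== Notes on version B (the rewrite author's own statement) =====
-- stated objective: simpler
-- what changed: Replaces the element-by-element copy-and-skip loop with index arithmetic and concatenation of two slices (or one slice when no character is skipped), normalising a negative truncate_index as a Python position.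
-- intended difference: On a negative truncate_index (down to -len(seq)) A's range starts at the negative index, so Python's negative indexing wraps and A returns the string's tail followed by the whole string again instead of a truncation; B treats the negative index as the usual Python position and returns just the truncated suffix, which is the intended value. — e.g. on mod_sequence("ab", none, some (-1)): A returns "bab", B returns "b"
import Mathlib
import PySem

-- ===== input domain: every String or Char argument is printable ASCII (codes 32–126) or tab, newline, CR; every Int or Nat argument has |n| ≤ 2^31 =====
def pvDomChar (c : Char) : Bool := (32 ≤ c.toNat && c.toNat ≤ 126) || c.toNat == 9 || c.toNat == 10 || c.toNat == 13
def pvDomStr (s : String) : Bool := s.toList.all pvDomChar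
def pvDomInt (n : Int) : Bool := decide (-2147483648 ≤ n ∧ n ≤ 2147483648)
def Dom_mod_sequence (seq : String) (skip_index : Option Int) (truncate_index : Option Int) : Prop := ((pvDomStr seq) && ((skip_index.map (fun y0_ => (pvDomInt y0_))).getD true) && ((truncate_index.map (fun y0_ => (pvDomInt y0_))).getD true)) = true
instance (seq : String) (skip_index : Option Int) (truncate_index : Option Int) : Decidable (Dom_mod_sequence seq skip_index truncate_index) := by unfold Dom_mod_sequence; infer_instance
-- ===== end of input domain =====

-- B replaces A's per-character copy-and-skip loop by slice arithmetic; on negative truncate_index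
-- (where A's loop wraps around and duplicates text) B returns the plainly truncated suffix (see D_).

-- ===== PORT A =====
def mod_sequence (seq : String) (skip_index : Option Int) (truncate_index : Option Int) : String :=
  let seq_length : Int := PySem.Str.len seq
  let start_value : Int :=
    match truncate_index with
    | none => 0
    | some t => if t ≥ seq_length then 0 else t
  -- for x in range(start_value, seq_length): if x == skip_index: continue else result += seq[x]
  -- (seq[x] out of range is IndexError in Python: pyGet? = none there, excluded by Pre_)
  let result : List Char :=
    (PySem.List.pyRange start_value seq_length 1).foldl
      (fun result x =>
        if some x == skip_index then result
        else result ++ (PySem.Str.pyGet? seq x).toList) []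
  String.ofList result

-- ===== PORT B =====
def mod_sequence_alt (seq : String) (skip_index : Option Int) (truncate_index : Option Int) : String :=
  let n : Int := PySem.Str.len seq
  let start : Int :=
    match truncate_index with
    | none => 0
    | some t => if t ≥ n then 0 else if t < 0 then n + t else t
  let cs := seq.toList
  match skip_index with
  | some k =>
      if start ≤ k ∧ k < n then
        String.ofList (PySem.List.slice cs (some start) (some k) ++ PySem.List.slice cs (some (k + 1)) none)
      else String.ofList (PySem.List.slice cs (some start) none)
  | none => String.ofList (PySem.List.slice cs (some start) none)

-- ===== PRECONDITION & SPEC =====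
-- Pre_ excludes exactly the inputs where A raises IndexError: truncate_index below -len(seq),
-- except the one sliver where the single out-of-range index is itself the skipped one.
def Pre_mod_sequence (seq : String) (skip_index : Option Int) (truncate_index : Option Int) : Prop :=
  -(PySem.Str.len seq) ≤ truncate_index.getD 0 ∨
    (truncate_index = some (-(PySem.Str.len seq) - 1) ∧ skip_index = truncate_index)
instance (seq : String) (skip_index : Option Int) (truncate_index : Option Int) : Decidable (Pre_mod_sequence seq skip_index truncate_index) := by unfold Pre_mod_sequence; infer_instance
def pvWitness_mod_sequence : String × Option Int × Option Int := ("abc", some 1, some 1)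

-- On a negative truncate_index (within Pre_) A's range starts at the negative index, so Python's negative
-- indexing wraps and A returns the string's tail followed by the whole string again instead of a
-- truncation; B treats the negative index as the usual Python position and returns just the truncated
-- suffix, which is the intended value.
def D_mod_sequence (seq : String) (skip_index : Option Int) (truncate_index : Option Int) : Prop :=
  truncate_index.getD 0 < 0
instance (seq : String) (skip_index : Option Int) (truncate_index : Option Int) : Decidable (D_mod_sequence seq skip_index truncate_index) := by unfold D_mod_sequence; infer_instance

def Spec_mod_sequence (seq : String) (skip_index : Option Int) (truncate_index : Option Int) (out : String) : Prop := ¬ D_mod_sequence seq skip_index truncate_index → out = mod_sequence_alt seq skip_index truncate_index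
instance (seq : String) (skip_index : Option Int) (truncate_index : Option Int) (out : String) : Decidable (Spec_mod_sequence seq skip_index truncate_index out) := by unfold Spec_mod_sequence; infer_instance

def pvDiffWitness_mod_sequence : String × Option Int × Option Int := ("ab", none, some (-1))
def pvDiffWitnessOut_mod_sequence : String × String := ("bab", "b")

-- ===== CLAIM (what is proved, stated in full; the proofs are below) =====
def Claim_unchanged_mod_sequence : Prop := ∀ (seq : String) (skip_index : Option Int) (truncate_index : Option Int), Dom_mod_sequence seq skip_index truncate_index → Pre_mod_sequence seq skip_index truncate_index → Spec_mod_sequence seq skip_index truncate_index (mod_sequence seq skip_index truncate_index)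
def Claim_changed_mod_sequence : Prop := Dom_mod_sequence (pvDiffWitness_mod_sequence.1) (pvDiffWitness_mod_sequence.2.1) (pvDiffWitness_mod_sequence.2.2) ∧ Pre_mod_sequence (pvDiffWitness_mod_sequence.1) (pvDiffWitness_mod_sequence.2.1) (pvDiffWitness_mod_sequence.2.2) ∧ D_mod_sequence (pvDiffWitness_mod_sequence.1) (pvDiffWitness_mod_sequence.2.1) (pvDiffWitness_mod_sequence.2.2) ∧ mod_sequence (pvDiffWitness_mod_sequence.1) (pvDiffWitness_mod_sequence.2.1) (pvDiffWitness_mod_sequence.2.2) = pvDiffWitnessOut_mod_sequence.1 ∧ mod_sequence_alt (pvDiffWitness_mod_sequence.1) (pvDiffWitness_mod_sequence.2.1) (pvDiffWitness_mod_sequence.2.2) = pvDiffWitnessOut_mod_sequence.2 ∧ pvDiffWitnessOut_mod_sequence.1 ≠ pvDiffWitnessOut_mod_sequence.2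
-- ===== LEMMAS AND PROOFS =====

-- what A's loop keeps from index a on: the suffix from a, minus the skipped position
def pvKeep (cs : List Char) (skip : Option Int) (a : Nat) : List Char :=
  match skip with
  | some k => if (a : Int) ≤ k ∧ k < (cs.length : Int)
              then (cs.drop a).take (k.toNat - a) ++ cs.drop (k.toNat + 1)
              else cs.drop a
  | none => cs.drop a

lemma pv_flatMap_range (seq : String) (skip : Option Int) (a : Nat) (h : a ≤ seq.toList.length) :
    (PySem.List.pyRange (a : Int) (seq.toList.length : Int) 1).flatMap
      (fun x => if some x == skip then [] else (PySem.Str.pyGet? seq x).toList)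
    = pvKeep seq.toList skip a := by
  generalize hf : seq.toList.length - a = f
  induction f generalizing a with
  | zero =>
    have ha : a = seq.toList.length := by omega
    subst ha
    rw [PySem.List.pyRange_one_eq_nil (le_refl _), List.flatMap_nil]
    cases skip with
    | none => simp [pvKeep]
    | some k =>
      simp only [pvKeep]
      rw [if_neg (by omega)]
      simp
  | succ f ih =>
    have ha : a < seq.toList.length := by omega
    rw [PySem.List.pyRange_one_cons (by exact_mod_cast ha), List.flatMap_cons]
    have h1 : ((a : Int) + 1) = ((a + 1 : Nat) : Int) := by push_cast; ring
    rw [h1, ih (a + 1) (by omega) (by omega)]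
    have hget : PySem.Str.pyGet? seq ((a : Nat) : Int) = some seq.toList[a] := by
      rw [PySem.Str.pyGet?_natCast]
      exact List.getElem?_eq_getElem ha
    cases skip with
    | none =>
      simp only [pvKeep]
      rw [if_neg (by simp), hget, Option.toList_some, List.singleton_append,
        ← List.drop_eq_getElem_cons ha]
    | some k =>
      by_cases hk : (a : Int) = k
      · subst hk
        rw [if_pos (by simp)]
        simp only [List.nil_append, pvKeep, Int.toNat_natCast]
        rw [if_neg (by omega), if_pos ⟨le_refl _, by exact_mod_cast ha⟩]
        simp
      · have hbeq : (some ((a : Nat) : Int) == some k) = false := by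
          simp [hk]
        rw [hbeq]
        simp only [Bool.false_eq_true, if_false, hget, Option.toList_some]
        by_cases hka : ((a + 1 : Nat) : Int) ≤ k ∧ k < (seq.toList.length : Int)
        · simp only [pvKeep]
          rw [if_pos hka, if_pos (by push_cast at hka ⊢; omega)]
          have hk1 : k.toNat - a = (k.toNat - (a + 1)) + 1 := by
            push_cast at hka; omega
          rw [List.drop_eq_getElem_cons ha, hk1, List.take_succ_cons]
          simp
        · simp only [pvKeep]
          rw [if_neg hka, if_neg (by push_cast at hka ⊢; omega)]
          exact (List.drop_eq_getElem_cons ha).symm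

-- A's loop body, rewritten so the accumulator is appended on both branches
lemma pv_loop_body (seq : String) (skip : Option Int) (l : List Int) (acc : List Char) :
    l.foldl (fun result x =>
        if some x == skip then result
        else result ++ (PySem.Str.pyGet? seq x).toList) acc
    = acc ++ l.flatMap (fun x => if some x == skip then [] else (PySem.Str.pyGet? seq x).toList) := by
  rw [← PySem.List.foldl_append_eq_flatMap]
  apply PySem.List.foldl_congr_mem
  intro acc x _
  by_cases hx : (some x == skip) = true <;> simp [hx]

-- both ports, once the start index is known to be the natural number a
lemma pv_main (seq : String) (skip : Option Int) (start : Int) (a : Nat)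
    (hs : start = (a : Int)) (hle : a ≤ seq.toList.length) :
    String.ofList
      ((PySem.List.pyRange start (seq.toList.length : Int) 1).foldl
        (fun result x =>
          if some x == skip then result
          else result ++ (PySem.Str.pyGet? seq x).toList) [])
    = match skip with
      | some k =>
          if start ≤ k ∧ k < (seq.toList.length : Int) then
            String.ofList (PySem.List.slice seq.toList (some start) (some k) ++
              PySem.List.slice seq.toList (some (k + 1)) none)
          else String.ofList (PySem.List.slice seq.toList (some start) none)
      | none => String.ofList (PySem.List.slice seq.toList (some start) none) := by
  subst hs
  rw [pv_loop_body, List.nil_append, pv_flatMap_range seq skip a hle]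
  cases skip with
  | none =>
    simp only [pvKeep]
    rw [PySem.List.slice_from_natCast]
  | some k =>
    simp only [pvKeep]
    by_cases hc : ((a : Nat) : Int) ≤ k ∧ k < (seq.toList.length : Int)
    · rw [if_pos hc, if_pos hc]
      obtain ⟨kn, rfl⟩ : ∃ kn : Nat, k = (kn : Int) := ⟨k.toNat, by omega⟩
      rw [show ((kn : Int) + 1) = ((kn + 1 : Nat) : Int) by push_cast; ring,
        PySem.List.slice_natCast, PySem.List.slice_from_natCast, Int.toNat_natCast]
    · rw [if_neg hc, if_neg hc, PySem.List.slice_from_natCast]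

theorem mod_sequence_spec : Claim_unchanged_mod_sequence := by
  intro seq skip trunc hdom hpre hnd
  simp only [D_mod_sequence, not_lt] at hnd
  cases trunc with
  | none =>
    simp only [mod_sequence, mod_sequence_alt, PySem.Str.len_eq]
    exact pv_main seq skip 0 0 (by norm_num) (by omega)
  | some t =>
    simp only [Option.getD_some] at hnd
    simp only [mod_sequence, mod_sequence_alt, PySem.Str.len_eq]
    have hBA : (if t ≥ (seq.toList.length : Int) then (0 : Int)
            else if t < 0 then (seq.toList.length : Int) + t else t)
          = (if t ≥ (seq.toList.length : Int) then (0 : Int) else t) := by split_ifs <;> omega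
    by_cases ht : t ≥ (seq.toList.length : Int)
    · have e : (if t ≥ (seq.toList.length : Int) then (0 : Int) else t) = 0 := if_pos ht
      simp only [hBA, e]
      rw [if_pos ht]
      exact pv_main seq skip 0 0 (by norm_num) (by omega)
    · have e : (if t ≥ (seq.toList.length : Int) then (0 : Int) else t) = t := if_neg ht
      simp only [hBA, e]
      rw [if_neg ht]
      exact pv_main seq skip t t.toNat (by omega) (by omega)

theorem mod_sequence_changed : Claim_changed_mod_sequence := by
  unfold Claim_changed_mod_sequence; decide
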